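-- pv_equiv track=rewrite | github.com/chadireoroonu/2026_ALGORITHM | 01/P03_p_70129.py | solution
-- ===== SOURCE A (Python) =====
-- def solution(s):
--     answer = [0, 0]
--
--     # 0 제거
--     def zerokill(w):
--         answer[0] += 1
--         count = w.count('1')
--         answer[1] += len(w) - count
--
--         return binary(count)
--
--
--     # 2진 변환
--     def binary(n):
--         result = ''
--         while n > 0:
--             result += str(n % 2)
--             n //= 2
--
--         return result[::-1]
--
--
--     while s != '1':
--         s = zerokill(s)
--
--     return answer
-- ===== SOURCE B (Python) =====
-- def solution(s):
--     # Bottom-up DP: instead of A's chase down the reduction chain (rebuilding each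
--     # intermediate binary string), tabulate for every m up to the ones-count of s
--     # the iterations/zeros needed to reduce bin(m) to '1', then answer by lookup.
--     if s == '1':
--         return [0, 0]
--     c = s.count('1')
--     steps = [0, 0]
--     zeros = [0, 0]
--     for m in range(2, c + 1):
--         p = bin(m).count('1')
--         steps.append(steps[p] + 1)
--         zeros.append(zeros[p] + m.bit_length() - p)
--     return [steps[c] + 1, zeros[c] + len(s) - c]
-- ===== Notes on version B (the rewrite author's own statement) =====
-- stated objective: alternative
-- what changed: B replaces A's top-down chase along the reduction chain (rebuilding each intermediate binary string) by a bottom-up dynamic-programming table indexed by the ones-count: it tabulates iterations/removed-zeros for every m up to s.count('1') and answers by one lookup, with Pre_ excluding strings without a '1', on which A loops forever.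
import Mathlib
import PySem

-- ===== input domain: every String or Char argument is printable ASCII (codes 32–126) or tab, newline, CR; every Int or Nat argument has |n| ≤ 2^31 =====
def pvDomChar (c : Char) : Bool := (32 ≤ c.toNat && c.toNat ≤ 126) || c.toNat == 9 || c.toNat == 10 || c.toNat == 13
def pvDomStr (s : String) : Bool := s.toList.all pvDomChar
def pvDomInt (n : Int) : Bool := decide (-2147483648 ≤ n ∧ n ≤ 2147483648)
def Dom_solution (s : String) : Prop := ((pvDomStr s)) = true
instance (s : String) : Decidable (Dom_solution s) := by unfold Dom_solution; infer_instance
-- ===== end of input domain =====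

-- B replaces A's top-down walk along the reduction chain (which rebuilds each
-- intermediate binary string) by a bottom-up DP table indexed by the ones-count,
-- answered by one lookup; objective: alternative. Pre_ excludes strings without
-- a '1', on which Python A loops forever (it returns nothing there).

-- ===== PORT A =====
-- helper `binary`: result += str(n % 2); n //= 2; return result[::-1]
def binLoop (n : Int) (result : List Char) : List Char :=
  if 0 < n then
    binLoop (PySem.Int.floordiv n 2) (result ++ PySem.Int.toChars (PySem.Int.mod n 2))
  else result
termination_by n.toNat
decreasing_by
  rename_i h
  rw [PySem.Int.floordiv_eq_ediv_of_pos (by omega : (0:Int) < 2)]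
  omega

def binaryA (n : Int) : List Char := (binLoop n []).reverse

-- the `while s != '1': s = zerokill(s)` loop; fuel (length s + 1) suffices under
-- Pre_solution (s contains a '1'): the chain c → popcount c reaches 1 in < c steps
def loopA (fuel : Nat) (w : List Char) (a0 a1 : Int) : List Int :=
  match fuel with
  | 0 => [a0, a1]
  | fuel + 1 =>
    if w = ['1'] then [a0, a1]
    else
      let count : Int := (PySem.Chars.count w ['1'] : Int)
      loopA fuel (binaryA count) (a0 + 1) (a1 + (w.length : Int) - count)

def solution (s : String) : List Int := loopA (s.toList.length + 1) s.toList 0 0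

-- ===== PORT B =====
-- one pass of Source B's `for m in range(2, c+1)` DP loop over the pair of tables
def dpStep (t : List Int × List Int) (m : Int) : List Int × List Int :=
  let p : Int := (PySem.Int.bitCount m : Nat)
  (t.1 ++ [PySem.List.pyGetD t.1 p 0 + 1],
   t.2 ++ [PySem.List.pyGetD t.2 p 0 + ((PySem.Int.bitLength m : Nat) : Int) - p])

def dpTables (c : Int) : List Int × List Int :=
  (PySem.List.pyRange 2 (c + 1) 1).foldl dpStep ([0, 0], [0, 0])

def solution_alt (s : String) : List Int :=
  if s.toList = ['1'] then [0, 0]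
  else
    let c : Int := (PySem.Chars.count s.toList ['1'] : Nat)
    let t := dpTables c
    [PySem.List.pyGetD t.1 c 0 + 1,
     PySem.List.pyGetD t.2 c 0 + (s.toList.length : Int) - c]

-- ===== PRECONDITION & SPEC =====
-- Pre_ excludes exactly the strings with no '1': Python A never returns there
-- (its while-loop runs forever on the empty binary rendering of 0).
def Pre_solution (s : String) : Prop := '1' ∈ s.toList
instance (s : String) : Decidable (Pre_solution s) := by unfold Pre_solution; infer_instance

def pvWitness_solution : String := "110"

def Spec_solution (s : String) (out : List Int) : Prop := out = solution_alt s
instance (s : String) (out : List Int) : Decidable (Spec_solution s out) := by unfold Spec_solution; infer_instance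

-- ===== CLAIM (what is proved, stated in full; the proofs are below) =====
def Claim_equal_solution : Prop := ∀ (s : String), Dom_solution s → Pre_solution s → Spec_solution s (solution s)

-- ===== LEMMAS AND PROOFS =====

-- str.count with a single-character needle is List.count
theorem chars_count_go_single (c : Char) :
    ∀ (fuel : Nat) (l : List Char) (acc : Nat), l.length ≤ fuel →
      PySem.Chars.count.go [c] fuel l acc = acc + l.count c := by
  intro fuel
  induction fuel with
  | zero =>
    intro l acc h
    cases l with
    | nil => simp [PySem.Chars.count.go]
    | cons x t => simp at h
  | succ f ih =>
    intro l acc h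
    cases l with
    | nil => simp [PySem.Chars.count.go]
    | cons x t =>
      rw [PySem.Chars.count.go]
      by_cases hx : x = c
      · subst hx
        simp [List.isPrefixOf, ih t _ (by simpa using h)]
        omega
      · have : [c].isPrefixOf (x :: t) = false := by
          simp [List.isPrefixOf]
          exact fun hcx => (hx hcx.symm).elim
        simp [this, hx, ih t _ (by simpa using h)]

theorem chars_count_single (l : List Char) (c : Char) :
    PySem.Chars.count l [c] = l.count c := by
  simp [PySem.Chars.count]
  simpa using chars_count_go_single c l.length l 0 (le_refl _)

-- binLoop only appends to its accumulator
theorem binLoop_append : ∀ (k : Nat) (n : Int), n.toNat = k →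
    ∀ res, binLoop n res = res ++ binLoop n [] := by
  intro k
  induction k using Nat.strong_induction_on with
  | _ k ih =>
    intro n hk res
    rw [binLoop]
    conv_rhs => rw [binLoop]
    by_cases h : 0 < n
    · rw [if_pos h, if_pos h]
      have hlt : (PySem.Int.floordiv n 2).toNat < k := by
        rw [PySem.Int.floordiv_eq_ediv_of_pos (by omega : (0:Int) < 2)]
        omega
      rw [ih _ hlt _ rfl (res ++ PySem.Int.toChars (PySem.Int.mod n 2)),
          ih _ hlt _ rfl ([] ++ PySem.Int.toChars (PySem.Int.mod n 2))]
      simp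
    · rw [if_neg h, if_neg h]
      simp

-- the digit appended each step is '0' or '1'
theorem mod_two_cases (n : Int) :
    PySem.Int.mod n 2 = 0 ∨ PySem.Int.mod n 2 = 1 := by
  have h0 : 0 ≤ PySem.Int.mod n 2 := PySem.Int.mod_nonneg n (by omega)
  have h1 : PySem.Int.mod n 2 < 2 := PySem.Int.mod_lt n (by omega)
  omega

theorem digits_spec : ∀ (k : Nat) (n : Int), n.toNat = k → 0 ≤ n →
    (binLoop n []).count '1' = PySem.Int.bitCount n ∧
    (binLoop n []).length = PySem.Int.bitLength n := by
  intro k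
  induction k using Nat.strong_induction_on with
  | _ k ih =>
    intro n hk hn
    by_cases h : 0 < n
    · rw [binLoop, if_pos h,
        binLoop_append (PySem.Int.floordiv n 2).toNat _ rfl]
      have hd2 : PySem.Int.floordiv n 2 = n / 2 :=
        PySem.Int.floordiv_eq_ediv_of_pos (by omega : (0:Int) < 2)
      have hlt : (PySem.Int.floordiv n 2).toNat < k := by rw [hd2]; omega
      have hn2 : 0 ≤ PySem.Int.floordiv n 2 := by rw [hd2]; omega
      obtain ⟨ihc, ihl⟩ := ih _ hlt _ rfl hn2
      constructor
      · rw [PySem.Int.bitCount_of_pos h]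
        rcases mod_two_cases n with hm | hm
        · have hd : PySem.Int.toChars (PySem.Int.mod n 2) = ['0'] := by rw [hm]; decide
          rw [hd, hm]
          simp only [List.nil_append, List.count_append, ihc]
          rw [show List.count '1' ['0'] = 0 from by decide]
          omega
        · have hd : PySem.Int.toChars (PySem.Int.mod n 2) = ['1'] := by rw [hm]; decide
          rw [hd, hm]
          simp only [List.nil_append, List.count_append, ihc]
          rw [show List.count '1' ['1'] = 1 from by decide]
          omega
      · rw [PySem.Int.bitLength_of_pos h, List.length_append, ihl]
        rcases mod_two_cases n with hm | hm
        · have hd : PySem.Int.toChars (PySem.Int.mod n 2) = ['0'] := by rw [hm]; decide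
          rw [hd]
          simp only [List.nil_append, List.length_singleton]
          omega
        · have hd : PySem.Int.toChars (PySem.Int.mod n 2) = ['1'] := by rw [hm]; decide
          rw [hd]
          simp only [List.nil_append, List.length_singleton]
          omega
    · have hn0 : n = 0 := by omega
      subst hn0
      rw [binLoop]
      simp [PySem.Int.bitCount_zero, PySem.Int.bitLength_zero]

theorem binaryA_count (n : Int) (h : 0 ≤ n) :
    (binaryA n).count '1' = PySem.Int.bitCount n := by
  rw [binaryA, List.count_reverse]
  exact (digits_spec n.toNat n rfl h).1

theorem binaryA_length (n : Int) (h : 0 ≤ n) :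
    (binaryA n).length = PySem.Int.bitLength n := by
  rw [binaryA, List.length_reverse]
  exact (digits_spec n.toNat n rfl h).2

theorem binaryA_one : binaryA 1 = ['1'] := by
  have h2 : PySem.Int.floordiv 1 2 = 0 := by decide
  have h3 : PySem.Int.toChars (PySem.Int.mod 1 2) = ['1'] := by decide
  rw [binaryA, binLoop, if_pos (by omega : (0:Int) < 1), h2, h3, binLoop,
      if_neg (by omega : ¬ (0:Int) < 0)]
  simp

theorem binaryA_eq_one_iff (n : Int) (h : 0 ≤ n) : binaryA n = ['1'] ↔ n = 1 := by
  constructor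
  · intro he
    have hl : PySem.Int.bitLength n = 1 := by
      rw [← binaryA_length n h, he]; rfl
    have hne : n ≠ 0 := by
      intro h0; subst h0; rw [PySem.Int.bitLength_zero] at hl; exact absurd hl (by decide)
    have h1 := PySem.Int.two_pow_bitLength_le n hne
    have h2 := PySem.Int.lt_two_pow_bitLength n
    rw [hl] at h1 h2
    simp at h1 h2
    omega
  · intro h1; subst h1; exact binaryA_one

-- ===== the reduction chain: popcount is positive and strictly decreasing =====

theorem pc_pos : ∀ (k : Nat) (m : Int), m.toNat = k → 1 ≤ m →
    1 ≤ PySem.Int.bitCount m := by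
  intro k
  induction k using Nat.strong_induction_on with
  | _ k ih =>
    intro m hk hm
    rw [PySem.Int.bitCount_of_pos (by omega)]
    have hd2 : PySem.Int.floordiv m 2 = m / 2 :=
      PySem.Int.floordiv_eq_ediv_of_pos (by omega : (0:Int) < 2)
    rcases mod_two_cases m with hm2 | hm2
    · have hme : 2 ∣ m := by
        exact (PySem.Int.mod_eq_zero_iff_dvd m 2).1 hm2
      have hge : 2 ≤ m := by omega
      have h1 : 1 ≤ PySem.Int.floordiv m 2 := by rw [hd2]; omega
      have hlt : (PySem.Int.floordiv m 2).toNat < k := by rw [hd2]; omega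
      have := ih _ hlt _ rfl h1
      omega
    · rw [hm2]; omega

theorem two_lt_pow (a : Nat) (h : 3 ≤ a) : a < 2 ^ (a - 1) := by
  induction a with
  | zero => omega
  | succ n ih =>
    rcases Nat.lt_or_ge n 3 with hn | hn
    · interval_cases n <;> simp_all
    · have := ih (by omega)
      have h2 : n - 1 + 1 = n + 1 - 1 := by omega
      calc n + 1 < 2 ^ (n - 1) + 2 ^ (n - 1) := by omega
        _ = 2 ^ (n - 1 + 1) := by ring
        _ = 2 ^ (n + 1 - 1) := by rw [h2]

theorem pc_lt (m : Int) (h : 2 ≤ m) : (PySem.Int.bitCount m : Int) < m := by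
  rcases eq_or_lt_of_le h with h2 | h3
  · rw [← h2]; decide
  · -- m ≥ 3: bitCount ≤ bitLength < m
    have hbc := PySem.Int.bitCount_le_bitLength m
    have hne : m ≠ 0 := by omega
    have hlow := PySem.Int.two_pow_bitLength_le m hne
    have hup : PySem.Int.bitLength m - 1 < 2 ^ (PySem.Int.bitLength m - 1) :=
      Nat.lt_two_pow_self
    have hna : m.natAbs = m.toNat := by omega
    have hbl_le : PySem.Int.bitLength m ≤ m.toNat := by omega
    have hblm : PySem.Int.bitLength m < m.toNat := by
      rcases eq_or_lt_of_le hbl_le with he | hl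
      · exfalso
        have h3' : 3 ≤ m.toNat := by omega
        have := two_lt_pow m.toNat h3'
        rw [he] at hlow
        omega
      · exact hl
    omega

-- the chain invariants: iterations and removed zeros to reduce bin(m) to '1'
def chainI (m : Int) : Int :=
  if _h : m ≤ 1 then 0
  else 1 + chainI ((PySem.Int.bitCount m : Nat) : Int)
termination_by m.toNat
decreasing_by
  have := pc_lt m (by omega)
  omega

def chainZ (m : Int) : Int :=
  if _h : m ≤ 1 then 0
  else chainZ ((PySem.Int.bitCount m : Nat) : Int)
       + ((PySem.Int.bitLength m : Nat) : Int) - (PySem.Int.bitCount m : Nat)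
termination_by m.toNat
decreasing_by
  have := pc_lt m (by omega)
  omega

theorem chainI_nonneg : ∀ (k : Nat) (m : Int), m.toNat = k → 0 ≤ chainI m := by
  intro k
  induction k using Nat.strong_induction_on with
  | _ k ih =>
    intro m hk
    rw [chainI]
    by_cases h : m ≤ 1
    · simp [h]
    · rw [dif_neg h]
      have hpc := pc_lt m (by omega)
      have := ih ((PySem.Int.bitCount m : Nat) : Int).toNat (by omega) _ rfl
      omega

theorem chainI_le : ∀ (k : Nat) (m : Int), m.toNat = k → 1 ≤ m →
    chainI m ≤ m - 1 := by
  intro k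
  induction k using Nat.strong_induction_on with
  | _ k ih =>
    intro m hk hm
    rw [chainI]
    by_cases h : m ≤ 1
    · rw [dif_pos h]; omega
    · rw [dif_neg h]
      have hpc := pc_lt m (by omega)
      have hp1 := pc_pos m.toNat m rfl (by omega)
      have := ih ((PySem.Int.bitCount m : Nat) : Int).toNat (by omega) _ rfl (by omega)
      omega

-- A's loop computes the chain invariants
theorem loopA_chain : ∀ (fuel : Nat) (m : Int), 1 ≤ m → chainI m ≤ (fuel : Int) →
    ∀ a0 a1, loopA fuel (binaryA m) a0 a1 = [a0 + chainI m, a1 + chainZ m] := by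
  intro fuel
  induction fuel with
  | zero =>
    intro m hm hf a0 a1
    have h0 := chainI_nonneg m.toNat m rfl
    have h1 : chainI m = 0 := by omega
    have hm1 : m = 1 := by
      by_contra hne
      rw [chainI, dif_neg (by omega)] at h1
      have := chainI_nonneg ((PySem.Int.bitCount m : Nat) : Int).toNat _ rfl
      omega
    subst hm1
    rw [loopA, h1, chainZ, dif_pos (by omega)]
    simp
  | succ f ih =>
    intro m hm hf a0 a1
    by_cases h1 : m = 1
    · subst h1
      rw [loopA, if_pos binaryA_one, chainI, chainZ]
      simp
    · have hm2 : 2 ≤ m := by omega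
      have hne : binaryA m ≠ ['1'] := fun he =>
        h1 ((binaryA_eq_one_iff m (by omega)).1 he)
      rw [loopA, if_neg hne]
      have hc : (PySem.Chars.count (binaryA m) ['1'] : Int)
          = ((PySem.Int.bitCount m : Nat) : Int) := by
        rw [chars_count_single, binaryA_count m (by omega)]
      have hl : ((binaryA m).length : Int) = ((PySem.Int.bitLength m : Nat) : Int) := by
        rw [binaryA_length m (by omega)]
      have hIrec : chainI m = 1 + chainI ((PySem.Int.bitCount m : Nat) : Int) := by
        rw [chainI, dif_neg (by omega)]
      have hZrec : chainZ m = chainZ ((PySem.Int.bitCount m : Nat) : Int)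
          + ((PySem.Int.bitLength m : Nat) : Int) - (PySem.Int.bitCount m : Nat) := by
        rw [chainZ, dif_neg (by omega)]
      have hp1 := pc_pos m.toNat m rfl (by omega)
      have hrec := ih ((PySem.Int.bitCount m : Nat) : Int) (by omega)
        (by omega) (a0 + 1) (a1 + ((binaryA m).length : Int) - (PySem.Int.bitCount m : Nat))
      simp only [hc, hl] at hrec ⊢
      rw [hrec, hIrec, hZrec]
      simp only [List.cons.injEq, and_true]
      constructor <;> omega

-- ===== B's DP table contains the chain invariants =====

theorem dp_inv : ∀ (n : Nat),
    (((PySem.List.pyRange 2 (2 + (n : Int)) 1).foldl dpStep ([0,0],[0,0])).1.length = n + 2 ∧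
     ((PySem.List.pyRange 2 (2 + (n : Int)) 1).foldl dpStep ([0,0],[0,0])).2.length = n + 2) ∧
    ∀ k : Nat, k < n + 2 →
      ((PySem.List.pyRange 2 (2 + (n : Int)) 1).foldl dpStep ([0,0],[0,0])).1.getD k 0
        = chainI (k : Int) ∧
      ((PySem.List.pyRange 2 (2 + (n : Int)) 1).foldl dpStep ([0,0],[0,0])).2.getD k 0
        = chainZ (k : Int) := by
  intro n
  induction n with
  | zero =>
    rw [PySem.List.pyRange_one_eq_nil (by omega)]
    refine ⟨⟨rfl, rfl⟩, ?_⟩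
    intro k hk
    interval_cases k <;>
      exact ⟨by rw [chainI, dif_pos (by omega)]; rfl,
             by rw [chainZ, dif_pos (by omega)]; rfl⟩
  | succ n ih =>
    have hsplit : PySem.List.pyRange 2 (2 + ((n + 1 : Nat) : Int)) 1
        = PySem.List.pyRange 2 (2 + (n : Int)) 1 ++ [2 + (n : Int)] := by
      have : (2 + ((n + 1 : Nat) : Int)) = (2 + (n : Int)) + 1 := by push_cast; ring
      rw [this, PySem.List.pyRange_one_succ_right (by omega)]
    rw [hsplit, List.foldl_append]
    set T := (PySem.List.pyRange 2 (2 + (n : Int)) 1).foldl dpStep ([0,0],[0,0]) with hT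
    obtain ⟨⟨hl1, hl2⟩, hent⟩ := ih
    -- the new row: p = popcount(2+n), both lookups hit the table within range
    have hpcN : PySem.Int.bitCount (2 + (n : Int)) < n + 2 := by
      have := pc_lt (2 + (n : Int)) (by omega)
      omega
    obtain ⟨he1, he2⟩ := hent (PySem.Int.bitCount (2 + (n : Int))) hpcN
    have hg1 : PySem.List.pyGetD T.1 ((PySem.Int.bitCount (2 + (n : Int)) : Nat) : Int) 0
        = chainI ((PySem.Int.bitCount (2 + (n : Int)) : Nat) : Int) := by
      rw [PySem.List.pyGetD_natCast, he1]
    have hg2 : PySem.List.pyGetD T.2 ((PySem.Int.bitCount (2 + (n : Int)) : Nat) : Int) 0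
        = chainZ ((PySem.Int.bitCount (2 + (n : Int)) : Nat) : Int) := by
      rw [PySem.List.pyGetD_natCast, he2]
    have hstep : dpStep T (2 + (n : Int))
        = (T.1 ++ [chainI (2 + (n : Int))], T.2 ++ [chainZ (2 + (n : Int))]) := by
      rw [dpStep]
      have hI : chainI (2 + (n : Int))
          = 1 + chainI ((PySem.Int.bitCount (2 + (n : Int)) : Nat) : Int) := by
        rw [chainI, dif_neg (by omega)]
      have hZ : chainZ (2 + (n : Int))
          = chainZ ((PySem.Int.bitCount (2 + (n : Int)) : Nat) : Int)
            + ((PySem.Int.bitLength (2 + (n : Int)) : Nat) : Int)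
            - (PySem.Int.bitCount (2 + (n : Int)) : Nat) := by
        rw [chainZ, dif_neg (by omega)]
      simp only [hg1, hg2]
      rw [Prod.ext_iff]
      constructor
      · show T.1 ++ _ = T.1 ++ _
        rw [hI]
        simp only [List.cons.injEq, and_true, List.append_cancel_left_eq]
        omega
      · show T.2 ++ _ = T.2 ++ _
        rw [hZ]
    simp only [List.foldl_cons, List.foldl_nil]
    rw [hstep]
    refine ⟨⟨by simp [hl1], by simp [hl2]⟩, ?_⟩
    intro k hk
    by_cases hkn : k < n + 2
    · obtain ⟨hk1, hk2⟩ := hent k hkn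
      constructor
      · rw [List.getD_eq_getElem?_getD, List.getElem?_append_left (by omega),
            ← List.getD_eq_getElem?_getD, hk1]
      · rw [List.getD_eq_getElem?_getD, List.getElem?_append_left (by omega),
            ← List.getD_eq_getElem?_getD, hk2]
    · have hkeq : k = n + 2 := by omega
      subst hkeq
      have hcast : ((n + 2 : Nat) : Int) = 2 + (n : Int) := by push_cast; ring
      constructor
      · rw [List.getD_eq_getElem?_getD, show n + 2 = T.1.length from by omega,
            List.getElem?_append_right (le_refl _)]
        simp [hcast, hl1]
      · rw [List.getD_eq_getElem?_getD, show n + 2 = T.2.length from by omega,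
            List.getElem?_append_right (le_refl _)]
        simp [hcast, hl2]

theorem dpTables_getD (c : Nat) (hc : 1 ≤ c) :
    PySem.List.pyGetD (dpTables (c : Int)).1 (c : Int) 0 = chainI (c : Int) ∧
    PySem.List.pyGetD (dpTables (c : Int)).2 (c : Int) 0 = chainZ (c : Int) := by
  have hcast : (c : Int) + 1 = 2 + ((c - 1 : Nat) : Int) := by omega
  obtain ⟨_, hent⟩ := dp_inv (c - 1)
  obtain ⟨h1, h2⟩ := hent c (by omega)
  rw [dpTables, hcast]
  exact ⟨by rw [PySem.List.pyGetD_natCast, h1], by rw [PySem.List.pyGetD_natCast, h2]⟩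

-- ===== VERDICT (by name: the statement is the Claim_ definition above) =====
theorem solution_spec : Claim_equal_solution := by
  intro s _ hpre
  unfold Spec_solution solution solution_alt
  rw [loopA]
  by_cases h : s.toList = ['1']
  · rw [if_pos h, if_pos h]
  · rw [if_neg h, if_neg h]
    set c : Nat := PySem.Chars.count s.toList ['1'] with hc
    have hcnt : c = s.toList.count '1' := chars_count_single s.toList '1'
    have hc1 : 1 ≤ c := by
      rw [hcnt]
      exact List.count_pos_iff.2 hpre
    have hclen : c ≤ s.toList.length := by
      rw [hcnt]; exact List.count_le_length
    have hIle := chainI_le ((c : Int)).toNat (c : Int) rfl (by omega)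
    have hchain := loopA_chain s.toList.length (c : Int) (by omega)
      (by omega) (0 + 1) (0 + (s.toList.length : Int) - (c : Int))
    rw [hchain]
    obtain ⟨hg1, hg2⟩ := dpTables_getD c hc1
    simp only [hg1, hg2]
    simp only [List.cons.injEq, and_true]
    constructor <;> omega
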